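-- pv_equiv track=rewrite | github.com/vincentbernat/QCss-3 | qcss3/web/virtualserver.py | aggregate_state
-- ===== SOURCE A (Python) =====
-- def aggregate_state(states):
--     if not states:
--         return "up"
--     state = states[0]
--     for rstate in states[1:]:
--         if rstate == "up":
--             if state == "disabled":
--                 state = "up"
--                 continue
--             if state == "down":
--                 state = "degraded"
--                 continue
--             continue
--         if rstate == "disabled":
--             continue
--         if rstate == "down":
--             if state == "up":
--                 state = "degraded"
--                 continue
--             if state == "disabled":
--                 state = "down"
--                 continue
--             continue
--     return state
-- ===== SOURCE B (Python) =====
-- MEMBER_STATES = ("up", "down", "disabled")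
--
-- def aggregate_state(states):
--     """Aggregate the states of a pool's members into one pool state.
--
--     An empty pool is "up".  A leading state that is not a plain member
--     state is already an aggregate (e.g. "degraded") or unknown, and is
--     kept unchanged.  Otherwise the pool state depends only on which
--     member states are present: members both "up" and "down" make the
--     pool "degraded", otherwise any "up" member makes it "up", any
--     "down" member makes it "down", and a pool of only disabled members
--     is "disabled".
--     """
--     if not states:
--         return "up"
--     if states[0] not in MEMBER_STATES:
--         return states[0]
--     if "up" in states:
--         return "degraded" if "down" in states else "up"
--     return "down" if "down" in states else "disabled"
-- ===== Notes on version B (the rewrite author's own statement) =====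
-- stated objective: simpler
-- what changed: Replaced the left-to-right state-machine fold with a direct case analysis: keep a leading non-member state unchanged, otherwise decide the pool state from two membership tests ('up' in states, 'down' in states).
import Mathlib
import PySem

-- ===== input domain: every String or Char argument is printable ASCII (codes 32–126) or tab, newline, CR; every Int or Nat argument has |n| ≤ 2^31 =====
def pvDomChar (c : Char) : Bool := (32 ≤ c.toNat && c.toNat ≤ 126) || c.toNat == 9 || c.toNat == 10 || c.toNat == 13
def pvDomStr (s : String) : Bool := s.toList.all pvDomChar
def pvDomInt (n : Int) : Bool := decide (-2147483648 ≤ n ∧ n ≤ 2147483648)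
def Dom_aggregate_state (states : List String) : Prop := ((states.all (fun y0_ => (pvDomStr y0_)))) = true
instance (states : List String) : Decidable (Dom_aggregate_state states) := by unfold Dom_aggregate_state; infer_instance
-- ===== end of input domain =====

-- B replaces A's sequential state-machine fold with a direct case analysis on the leading state plus two membership tests (objective: simpler).

-- ===== PORT A =====
-- the body of A's for-loop over states[1:] (branches in A's order)
def aggStep (state rstate : String) : String :=
  if rstate = "up" then
    if state = "disabled" then "up"
    else if state = "down" then "degraded"
    else state
  else if rstate = "disabled" then state
  else if rstate = "down" then
    if state = "up" then "degraded"
    else if state = "disabled" then "down"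
    else state
  else state

def aggregate_state (states : List String) : String :=
  if states = [] then "up"
  else
    let state := states.headD ""
    (PySem.List.slice states (some 1) none).foldl aggStep state

-- ===== PORT B =====
def memberStates : List String := ["up", "down", "disabled"]

def aggregate_state_alt (states : List String) : String :=
  match states with
  | [] => "up"
  | first :: rest =>
    if first ∉ memberStates then first
    else if (first :: rest).contains "up" then
      if (first :: rest).contains "down" then "degraded" else "up"
    else if (first :: rest).contains "down" then "down"
    else "disabled"

-- ===== PRECONDITION & SPEC =====
def Spec_aggregate_state (states : List String) (out : String) : Prop := out = aggregate_state_alt states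
instance (states : List String) (out : String) : Decidable (Spec_aggregate_state states out) := by unfold Spec_aggregate_state; infer_instance

-- ===== CLAIM (what is proved, stated in full; the proofs are below) =====
def Claim_equal_aggregate_state : Prop := ∀ (states : List String), Dom_aggregate_state states → Spec_aggregate_state states (aggregate_state states)

-- ===== LEMMAS AND PROOFS =====

-- encode the {up,down,disabled,degraded} states by the two presence flags
def comb (hu hd : Bool) : String :=
  if hu && hd then "degraded" else if hu then "up" else if hd then "down" else "disabled"

theorem aggStep_comb (hu hd : Bool) (r : String) :
    aggStep (comb hu hd) r = comb (hu || (r = "up")) (hd || (r = "down")) := by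
  by_cases h1 : r = "up" <;> by_cases h2 : r = "down" <;> by_cases h3 : r = "disabled" <;>
    cases hu <;> cases hd <;> simp_all [aggStep, comb]

theorem fold_comb (rest : List String) (hu hd : Bool) :
    rest.foldl aggStep (comb hu hd)
      = comb (hu || rest.contains "up") (hd || rest.contains "down") := by
  induction rest generalizing hu hd with
  | nil => simp
  | cons r rest ih =>
    simp only [List.foldl_cons, aggStep_comb, ih, List.contains_cons]
    congr 1 <;> cases hu <;> cases hd <;> by_cases hr : r = "up" <;> by_cases hr' : r = "down" <;> simp_all <;>
      first
      | exact fun h => absurd h.symm hr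
      | exact fun h => absurd h.symm hr'

theorem fold_frozen (rest : List String) (s : String)
    (h1 : s ≠ "up") (h2 : s ≠ "down") (h3 : s ≠ "disabled") :
    rest.foldl aggStep s = s := by
  induction rest with
  | nil => rfl
  | cons r rest ih =>
    have : aggStep s r = s := by
      simp only [aggStep]
      split_ifs <;> simp_all
    simpa [this] using ih

-- B's value on a nonempty list whose first element is a member state, in the flag encoding
theorem aggB_std (first : String) (rest : List String) (h : first ∈ memberStates) :
    aggregate_state_alt (first :: rest)
      = comb ((first :: rest).contains "up") ((first :: rest).contains "down") := by
  simp only [aggregate_state_alt]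
  rw [if_neg (not_not_intro h)]
  cases hu : ((first :: rest).contains "up") <;> cases hd : ((first :: rest).contains "down") <;> simp [comb]

-- ===== VERDICT (by name: the statement is the Claim_ definition above) =====
theorem aggregate_state_spec : Claim_equal_aggregate_state := by
  intro states _
  unfold Spec_aggregate_state
  match states with
  | [] => rfl
  | first :: rest =>
    unfold aggregate_state
    simp only [List.headD_cons, PySem.List.slice_from_one, List.tail_cons,
      if_neg (List.cons_ne_nil _ _)]
    by_cases hstd : first ∈ memberStates
    · rw [aggB_std first rest hstd]
      simp only [memberStates, List.mem_cons, List.not_mem_nil, or_false] at hstd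
      rcases hstd with h | h | h <;> subst h
      · rw [show ("up" : String) = comb true false from rfl, fold_comb]; simp [comb]
      · rw [show ("down" : String) = comb false true from rfl, fold_comb]; simp [comb]
      · rw [show ("disabled" : String) = comb false false from rfl, fold_comb]; simp [comb]
    · have hm := hstd
      simp only [memberStates, List.mem_cons, List.not_mem_nil, or_false] at hm
      push Not at hm
      obtain ⟨h1, h2, h3⟩ := hm
      rw [fold_frozen rest first h1 h2 h3]
      simp only [aggregate_state_alt]
      rw [if_pos hstd]
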